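-- pv_equiv track=rewrite | github.com/SamuelFolledo/CS1.3-Core-Data-Structures-And-Algorithms | classwork/Palindromes-and-Strings/strings.py | find_index_recursively
-- ===== SOURCE A (Python) =====
-- def find_index_recursively(text_arr, pattern_arr, text_index=0, pattern_index=0):
--     if text_index > len(text_arr) - 1: #if text_index go out of bounds, then we reached the end without finding index
--         return None
--     if text_arr[text_index] != pattern_arr[pattern_index]: #check if characters does not match, pattern_index = 0
--         pattern_index = 0
--     if text_arr[text_index] == pattern_arr[pattern_index]: #if text char match with pattern char, move to next character
--         pattern_index += 1
--         if pattern_index == len(pattern_arr): #if the entire pattern char matches, return True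
--             return text_index + 1 - pattern_index #return (i + 1) - pattern_index
--     return find_index_recursively(text_arr, pattern_arr, text_index+1, pattern_index)
-- ===== SOURCE B (Python) =====
-- def find_index_recursively(text_arr, pattern_arr, text_index=0, pattern_index=0):
--     while text_index <= len(text_arr) - 1:
--         if text_arr[text_index] != pattern_arr[pattern_index]:
--             pattern_index = 0
--         if text_arr[text_index] == pattern_arr[pattern_index]:
--             pattern_index += 1
--             if pattern_index == len(pattern_arr):
--                 return text_index + 1 - pattern_index
--         text_index += 1
--     return None
-- ===== Notes on version B (the rewrite author's own statement) =====
-- stated objective: simpler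
-- what changed: The recursive non-backtracking scan is rewritten as a single iterative while-loop with the same (text_index, pattern_index) state, removing the per-character recursive call (and Python's recursion-depth limit on long texts).
import Mathlib
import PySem

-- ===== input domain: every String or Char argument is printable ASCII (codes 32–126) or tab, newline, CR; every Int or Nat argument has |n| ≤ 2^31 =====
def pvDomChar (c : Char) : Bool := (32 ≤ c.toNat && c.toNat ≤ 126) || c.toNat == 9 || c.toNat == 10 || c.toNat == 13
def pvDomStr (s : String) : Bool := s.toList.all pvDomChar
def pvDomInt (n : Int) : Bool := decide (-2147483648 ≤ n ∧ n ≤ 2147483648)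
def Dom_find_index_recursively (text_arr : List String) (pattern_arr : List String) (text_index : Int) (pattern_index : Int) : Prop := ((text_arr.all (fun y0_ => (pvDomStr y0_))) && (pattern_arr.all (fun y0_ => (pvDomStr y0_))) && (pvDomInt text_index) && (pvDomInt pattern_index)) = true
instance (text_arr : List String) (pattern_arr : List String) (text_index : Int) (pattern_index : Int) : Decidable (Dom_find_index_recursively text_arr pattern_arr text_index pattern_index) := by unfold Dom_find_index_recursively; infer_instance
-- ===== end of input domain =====

-- B replaces A's recursion by a single iterative pass with the same state (simpler decomposition, same O(n) cost).

-- ===== PORT A =====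
-- literal transliteration of A's recursion; where Python would raise IndexError
-- (pyGet? = none) the port returns none — those inputs are excluded by Pre_.
def find_index_recursively (text_arr : List String) (pattern_arr : List String) (text_index : Int) (pattern_index : Int) : Option Int :=
  if (text_arr.length : Int) - 1 < text_index then none
  else
    match PySem.List.pyGet? text_arr text_index, PySem.List.pyGet? pattern_arr pattern_index with
    | some tc, some _ =>
      -- if text_arr[text_index] != pattern_arr[pattern_index]: pattern_index = 0
      let pi1 := if (PySem.List.pyGet? pattern_arr pattern_index ≠ some tc) then (0 : Int) else pattern_index
      -- if text_arr[text_index] == pattern_arr[pattern_index]: (re-evaluated, pattern_index possibly reset)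
      match PySem.List.pyGet? pattern_arr pi1 with
      | some pc1 =>
        if tc = pc1 then
          if pi1 + 1 = (pattern_arr.length : Int) then some (text_index + 1 - (pi1 + 1))
          else find_index_recursively text_arr pattern_arr (text_index + 1) (pi1 + 1)
        else find_index_recursively text_arr pattern_arr (text_index + 1) pi1
      | none => none   -- Python raises here (outside Pre_)
    | _, _ => none     -- Python raises here (outside Pre_)
termination_by ((text_arr.length : Int) - text_index).toNat
decreasing_by all_goals omega

-- ===== PORT B =====
-- one iteration of B's while-loop body; state = (returned value if the loop has
-- exited, current pattern_index); the Option (Option Int) marks early exit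
-- (some none is the error channel for Python's IndexError, outside Pre_).
def pvAltStep (text_arr : List String) (pattern_arr : List String) (st : Option (Option Int) × Int) (i : Int) : Option (Option Int) × Int :=
  match st with
  | (some r, pi) => (some r, pi)
  | (none, pi) =>
    (PySem.List.pyGet? text_arr i).elim (some none, pi) (fun tc =>
      (PySem.List.pyGet? pattern_arr pi).elim (some none, pi) (fun pc =>
        -- if text_arr[text_index] != pattern_arr[pattern_index]: pattern_index = 0
        let pi1 := if tc ≠ pc then (0 : Int) else pi
        -- if text_arr[text_index] == pattern_arr[pattern_index]: (re-read after the possible reset)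
        (PySem.List.pyGet? pattern_arr pi1).elim (some none, pi1) (fun pc1 =>
          if tc = pc1 then
            if pi1 + 1 = (pattern_arr.length : Int) then (some (some (i + 1 - (pi1 + 1))), pi1 + 1)
            else (none, pi1 + 1)
          else (none, pi1))))

def find_index_recursively_alt (text_arr : List String) (pattern_arr : List String) (text_index : Int) (pattern_index : Int) : Option Int :=
  ((PySem.List.pyRange text_index (text_arr.length : Int) 1).foldl (pvAltStep text_arr pattern_arr) (none, pattern_index)).1.elim none id

-- ===== PRECONDITION & SPEC =====
-- Pre_ excludes exactly the inputs where Python A raises IndexError: a text index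
-- below -len(text_arr) that is still inside the loop, or an out-of-range
-- pattern_index while at least one loop iteration runs (in particular an empty
-- pattern). On every other input A returns normally.
def Pre_find_index_recursively (text_arr : List String) (pattern_arr : List String) (text_index : Int) (pattern_index : Int) : Prop :=
  (text_arr.length : Int) ≤ text_index ∨
  (-(text_arr.length : Int) ≤ text_index ∧ -(pattern_arr.length : Int) ≤ pattern_index ∧ pattern_index < (pattern_arr.length : Int))
instance (text_arr : List String) (pattern_arr : List String) (text_index : Int) (pattern_index : Int) : Decidable (Pre_find_index_recursively text_arr pattern_arr text_index pattern_index) := by unfold Pre_find_index_recursively; infer_instance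

def pvWitness_find_index_recursively : List String × List String × Int × Int := (["a", "b", "a", "b"], ["b", "a"], 0, 0)

def Spec_find_index_recursively (text_arr : List String) (pattern_arr : List String) (text_index : Int) (pattern_index : Int) (out : Option Int) : Prop := out = find_index_recursively_alt text_arr pattern_arr text_index pattern_index
instance (text_arr : List String) (pattern_arr : List String) (text_index : Int) (pattern_index : Int) (out : Option Int) : Decidable (Spec_find_index_recursively text_arr pattern_arr text_index pattern_index out) := by unfold Spec_find_index_recursively; infer_instance

-- ===== CLAIM (what is proved, stated in full; the proofs are below) =====
def Claim_equal_find_index_recursively : Prop := ∀ (text_arr : List String) (pattern_arr : List String) (text_index : Int) (pattern_index : Int), Dom_find_index_recursively text_arr pattern_arr text_index pattern_index → Pre_find_index_recursively text_arr pattern_arr text_index pattern_index → Spec_find_index_recursively text_arr pattern_arr text_index pattern_index (find_index_recursively text_arr pattern_arr text_index pattern_index)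

-- ===== LEMMAS AND PROOFS =====

-- once B's loop has returned, the remaining iterations change nothing
lemma pvAltStep_foldl_some (text_arr pattern_arr : List String) (l : List Int) (r : Option Int) (pi : Int) :
    l.foldl (pvAltStep text_arr pattern_arr) (some r, pi) = (some r, pi) := by
  induction l with
  | nil => rfl
  | cons x xs ih => simpa [pvAltStep] using ih

-- one unfolding of A's recursion is exactly one iteration of B's loop body
lemma pv_step_eq (text_arr pattern_arr : List String) (ti pi : Int) (h : ti < (text_arr.length : Int)) :
    find_index_recursively text_arr pattern_arr ti pi =
      (match pvAltStep text_arr pattern_arr (none, pi) ti with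
       | (some r, _) => r
       | (none, pi') => find_index_recursively text_arr pattern_arr (ti + 1) pi') := by
  rw [find_index_recursively, if_neg (by omega)]
  simp only [pvAltStep]
  cases htc : PySem.List.pyGet? text_arr ti with
  | none => rfl
  | some tc =>
    cases hpc : PySem.List.pyGet? pattern_arr pi with
    | none => rfl
    | some pc =>
      dsimp only [Option.elim]
      by_cases hq : tc = pc
      · subst hq
        rw [if_neg (show ¬ (some tc ≠ some tc) from fun hh => hh rfl),
            if_neg (show ¬ (tc ≠ tc) from fun hh => hh rfl), hpc]
        dsimp only [Option.elim]
        split_ifs <;> rfl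
      · rw [if_pos (show some pc ≠ some tc from fun hh => hq (Option.some.inj hh).symm),
            if_pos (show tc ≠ pc from hq)]
        cases hpc1 : PySem.List.pyGet? pattern_arr (0 : Int) with
        | none => rfl
        | some pc1 => dsimp only [Option.elim]; split_ifs <;> rfl
-- the two ports agree on EVERY input (on the error channel too)
lemma pv_main (text_arr pattern_arr : List String) :
    ∀ (n : Nat) (ti pi : Int), ((text_arr.length : Int) - ti).toNat = n →
      find_index_recursively text_arr pattern_arr ti pi = find_index_recursively_alt text_arr pattern_arr ti pi := by
  intro n
  induction n with
  | zero =>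
    intro ti pi hn
    have hle : (text_arr.length : Int) ≤ ti := by omega
    rw [find_index_recursively]
    simp only [find_index_recursively_alt, PySem.List.pyRange_one_eq_nil hle, List.foldl_nil]
    rw [if_pos (by omega)]
    rfl
  | succ k ih =>
    intro ti pi hn
    have hlt : ti < (text_arr.length : Int) := by omega
    rw [pv_step_eq text_arr pattern_arr ti pi hlt]
    conv_rhs => rw [find_index_recursively_alt, PySem.List.pyRange_one_cons hlt, List.foldl_cons]
    cases hstep : pvAltStep text_arr pattern_arr (none, pi) ti with
    | mk o pi' =>
      cases o with
      | some r => simp [pvAltStep_foldl_some]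
      | none =>
        dsimp only
        rw [ih (ti + 1) pi' (by omega)]
        rfl

-- ===== VERDICT (by name: the statement is the Claim_ definition above) =====
theorem find_index_recursively_spec : Claim_equal_find_index_recursively := by
  intro text_arr pattern_arr ti pi _ _
  unfold Spec_find_index_recursively
  exact pv_main text_arr pattern_arr _ ti pi rfl
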